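-- pv_equiv track=rewrite | github.com/nlpet/codility | counting-elements/perm_check.py | solution
-- ===== SOURCE A (Python) =====
-- def solution(A):
--     """Solution."""
--     unvisited = set([x for x in range(1, len(A) + 1)])
--     for n in A:
--         try:
--             unvisited.remove(n)
--         except KeyError:
--             return 0
--     if len(unvisited) == 0:
--         return 1
--     return 0
-- ===== SOURCE B (Python) =====
-- def solution(A):
--     """Solution."""
--     return 1 if sorted(A) == list(range(1, len(A) + 1)) else 0
-- ===== Notes on version B (the rewrite author's own statement) =====
-- stated objective: simpler
-- what changed: Replaces the set-removal loop with early return by a one-line sort-then-compare against list(range(1, n+1)).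
import Mathlib
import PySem

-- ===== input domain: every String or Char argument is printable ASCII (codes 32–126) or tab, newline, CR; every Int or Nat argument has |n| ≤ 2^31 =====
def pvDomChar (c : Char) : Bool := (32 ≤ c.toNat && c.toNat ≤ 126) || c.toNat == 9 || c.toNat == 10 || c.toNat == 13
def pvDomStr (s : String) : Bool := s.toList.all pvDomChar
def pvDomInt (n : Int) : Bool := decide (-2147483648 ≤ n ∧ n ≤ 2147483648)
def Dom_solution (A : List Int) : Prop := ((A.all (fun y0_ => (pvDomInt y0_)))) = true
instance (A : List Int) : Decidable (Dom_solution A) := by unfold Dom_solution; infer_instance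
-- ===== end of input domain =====

-- B is a one-line sort-then-compare permutation check instead of A's set-removal loop; return value only (neither mutates A).

-- ===== PORT A =====
-- the 'for n in A: try unvisited.remove(n) except KeyError: return 0' loop, then the final len check
def solutionLoop (ns : List Int) (unvisited : PySem.Set Int) : Int :=
  match ns with
  | [] => if PySem.Set.len unvisited = 0 then 1 else 0
  | n :: rest =>
    match PySem.Set.remove? unvisited n with
    | some s' => solutionLoop rest s'
    | none => 0          -- KeyError caught: return 0

def solution (A : List Int) : Int :=
  solutionLoop A (PySem.Set.ofList (PySem.List.pyRange 1 ((A.length : Int) + 1) 1))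

-- ===== PORT B =====
def solution_alt (A : List Int) : Int :=
  if PySem.List.sorted A (fun x => x) false = PySem.List.pyRange 1 ((A.length : Int) + 1) 1 then 1 else 0

-- ===== PRECONDITION & SPEC =====
def Spec_solution (A : List Int) (out : Int) : Prop := out = solution_alt A
instance (A : List Int) (out : Int) : Decidable (Spec_solution A out) := by unfold Spec_solution; infer_instance

-- ===== CLAIM (what is proved, stated in full; the proofs are below) =====
def Claim_equal_solution : Prop := ∀ (A : List Int), Dom_solution A → Spec_solution A (solution A)

-- ===== LEMMAS AND PROOFS =====

theorem discard_eq_erase (s : List Int) (n : Int) (h : s.Nodup) :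
    PySem.Set.discard s n = s.erase n := by
  rw [h.erase_eq_filter]
  simp [PySem.Set.discard]
  congr 1

-- the loop returns 1 exactly when the remaining input is a permutation of the remaining set
theorem solutionLoop_eq (ns : List Int) (s : PySem.Set Int) (hs : List.Nodup s) :
    solutionLoop ns s = if ns.Perm s then 1 else 0 := by
  induction ns generalizing s with
  | nil =>
    simp [solutionLoop, PySem.Set.len, List.length_eq_zero_iff]
  | cons n rest ih =>
    by_cases hmem : n ∈ s
    · rw [solutionLoop, PySem.Set.remove?_of_mem hmem, discard_eq_erase s n hs]
      show solutionLoop rest (s.erase n) = _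
      rw [ih _ (hs.erase n)]
      simp [List.cons_perm_iff_perm_erase, hmem]
    · rw [solutionLoop, (PySem.Set.remove?_eq_none_iff s n).mpr hmem]
      simp [List.cons_perm_iff_perm_erase, hmem]

-- ===== VERDICT (by name: the statement is the Claim_ definition above) =====
theorem solution_spec : Claim_equal_solution := by
  intro A _
  unfold Spec_solution solution solution_alt
  have hr := PySem.List.nodup_pyRange_one (a := 1) (b := ((A.length : Int) + 1))
  rw [PySem.Set.ofList_eq_self_of_nodup _ hr, solutionLoop_eq _ _ hr]
  by_cases hp : A.Perm (PySem.List.pyRange 1 ((A.length : Int) + 1) 1)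
  · rw [if_pos hp, if_pos]
    exact PySem.List.sorted_eq_of_perm_of_pairwise_lt _ _ _ hp.symm
      (PySem.List.pairwise_lt_pyRange_one 1 _)
  · rw [if_neg hp, if_neg]
    intro heq
    exact hp ((PySem.List.sorted_perm A (fun x => x) false).symm.trans (heq ▸ List.Perm.refl _))
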